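-- pv_equiv track=rewrite | github.com/tmzhuang/advent_of_code | 2019/day04/day04/utils.py | reduce_bool_row
-- ===== SOURCE A (Python) =====
-- def reduce_bool_row(bool_row):
--     for i, p in enumerate(bool_row):
--         if i == 0:
--             prev = False
--         else:
--             prev = bool_row[i-1]
--         if i == (len(bool_row) - 1):
--             next = False
--         else:
--             next = bool_row[i+1]
--         if p and not prev and not next:
--             return True
--     return False
-- ===== SOURCE B (Python) =====
-- def reduce_bool_row(bool_row):
--     # One pass run-length scan: an isolated True is exactly a maximal run
--     # of truthy elements of length 1.
--     run = 0
--     for p in bool_row: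
--         if p:
--             run += 1
--         else:
--             if run == 1:
--                 return True
--             run = 0
--     return run == 1
-- ===== Notes on version B (the rewrite author's own statement) =====
-- stated objective: alternative
-- what changed: Replaces the indexed neighbour-lookup loop (bool_row[i-1]/bool_row[i+1]) by a single index-free run-length scan that returns True when a maximal run of True values has length exactly 1.
import Mathlib
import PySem

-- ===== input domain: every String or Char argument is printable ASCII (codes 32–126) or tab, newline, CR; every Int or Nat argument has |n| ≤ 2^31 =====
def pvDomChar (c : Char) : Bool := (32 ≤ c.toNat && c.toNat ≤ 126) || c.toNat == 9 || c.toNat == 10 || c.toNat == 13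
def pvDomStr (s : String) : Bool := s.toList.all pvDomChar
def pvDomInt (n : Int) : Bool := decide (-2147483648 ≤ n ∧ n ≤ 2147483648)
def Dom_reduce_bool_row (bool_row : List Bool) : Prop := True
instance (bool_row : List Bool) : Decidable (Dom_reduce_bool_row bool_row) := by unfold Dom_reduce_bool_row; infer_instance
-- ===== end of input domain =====

-- ===== PORT A =====
-- B replaces A's indexed neighbour-lookup loop by an index-free run-length scan (alternative decomposition, same cost).
-- Transliteration of A: 'for i, p in enumerate(bool_row)' as recursion over the list carrying the index i;
-- bool_row[i-1] / bool_row[i+1] via PySem.List.pyGet? (always in range here, so .getD false is exact).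
def reduceLoopA (bool_row : List Bool) (i : Nat) : List Bool → Bool
  | [] => false
  | p :: rest =>
      let prev := if i = 0 then false else (PySem.List.pyGet? bool_row ((i : Int) - 1)).getD false
      let next := if i = bool_row.length - 1 then false else (PySem.List.pyGet? bool_row ((i : Int) + 1)).getD false
      if p && !prev && !next then true else reduceLoopA bool_row (i + 1) rest

def reduce_bool_row (bool_row : List Bool) : Bool :=
  reduceLoopA bool_row 0 bool_row

-- ===== PORT B =====
-- Transliteration of Source B: one pass with the length 'run' of the current run of True values.
def reduceLoopB : List Bool → Nat → Bool
  | [], run => run == 1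
  | p :: rest, run =>
      if p then reduceLoopB rest (run + 1)
      else if run == 1 then true else reduceLoopB rest 0

def reduce_bool_row_alt (bool_row : List Bool) : Bool :=
  reduceLoopB bool_row 0

-- ===== PRECONDITION & SPEC =====
def Spec_reduce_bool_row (bool_row : List Bool) (out : Bool) : Prop := out = reduce_bool_row_alt bool_row
instance (bool_row : List Bool) (out : Bool) : Decidable (Spec_reduce_bool_row bool_row out) := by unfold Spec_reduce_bool_row; infer_instance

-- ===== CLAIM (what is proved, stated in full; the proofs are below) =====
def Claim_equal_reduce_bool_row : Prop := ∀ (bool_row : List Bool), Dom_reduce_bool_row bool_row → Spec_reduce_bool_row bool_row (reduce_bool_row bool_row)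

-- ===== LEMMAS AND PROOFS =====

-- Common characterisation: iso prev xs = "xs has a true element whose predecessor
-- (prev for the first element) and successor (false at the end) are both false".
def iso (prev : Bool) : List Bool → Bool
  | [] => false
  | p :: rest => (p && !prev && !(rest.headD false)) || iso p rest

theorem reduceLoopA_eq_iso (pre cur : List Bool) :
    reduceLoopA (pre ++ cur) pre.length cur = iso (pre.getLastD false) cur := by
  induction cur generalizing pre with
  | nil => simp [reduceLoopA, iso]
  | cons p rest ih =>
    have hnext : (if pre.length = (pre ++ p :: rest).length - 1 then false
        else (PySem.List.pyGet? (pre ++ p :: rest) ((pre.length : Int) + 1)).getD false)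
        = rest.headD false := by
      rcases rest with _ | ⟨r, rs⟩
      · simp
      · have h1 : ((pre.length : Int) + 1) = ((pre ++ [p]).length : Int) := by simp
        have h2 : pre ++ p :: r :: rs = (pre ++ [p]) ++ r :: rs := by simp
        rw [h1, h2, PySem.List.pyGet?_append_length]
        simp
    have hprev : (if pre.length = 0 then false
        else (PySem.List.pyGet? (pre ++ p :: rest) ((pre.length : Int) - 1)).getD false)
        = pre.getLastD false := by
      rcases pre.eq_nil_or_concat with h | ⟨ys, y, h⟩
      · simp [h]
      · rw [List.concat_eq_append] at h
        subst h
        have h1 : ((ys ++ [y]).length : Int) - 1 = (ys.length : Int) := by simp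
        have h2 : (ys ++ [y]) ++ p :: rest = ys ++ y :: (p :: rest) := by simp
        rw [h1, h2, PySem.List.pyGet?_append_length]
        simp
    have hrec : reduceLoopA (pre ++ p :: rest) (pre.length + 1) rest = iso p rest := by
      have h2 : pre ++ p :: rest = (pre ++ [p]) ++ rest := by simp
      have h3 : pre.length + 1 = (pre ++ [p]).length := by simp
      rw [h2, h3, ih (pre ++ [p])]
      simp
    show (if p && !(if pre.length = 0 then false else _) && !(if _ then false else _) then true
        else reduceLoopA (pre ++ p :: rest) (pre.length + 1) rest) = _
    rw [hprev, hnext, hrec,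
      show iso (pre.getLastD false) (p :: rest)
        = ((p && !(pre.getLastD false) && !(rest.headD false)) || iso p rest) from rfl]
    cases hc : (p && !(pre.getLastD false) && !(rest.headD false)) <;> simp

theorem reduceLoopB_eq_iso (cur : List Bool) (run : Nat) :
    reduceLoopB cur run = (((run == 1) && !(cur.headD false)) || iso (!(run == 0)) cur) := by
  induction cur generalizing run with
  | nil => simp [reduceLoopB, iso]
  | cons p rest ih =>
    cases p with
    | true =>
      rw [show reduceLoopB (true :: rest) run = reduceLoopB rest (run + 1) from rfl, ih,
        show iso (!(run == 0)) (true :: rest)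
          = ((true && !(!(run == 0)) && !(rest.headD false)) || iso true rest) from rfl]
      have h1 : ((run + 1 == 1) : Bool) = (run == 0) := by simp
      have h2 : ((run + 1 == 0) : Bool) = false := by simp
      rw [h1, h2]
      cases hq : (run == 0) <;> cases hd : rest.headD false <;> simp
    | false =>
      rw [show reduceLoopB (false :: rest) run
          = (if run == 1 then true else reduceLoopB rest 0) from rfl,
        show iso (!(run == 0)) (false :: rest)
          = ((false && !(!(run == 0)) && !(rest.headD false)) || iso false rest) from rfl]
      cases h : (run == 1) with
      | true => simp
      | false => simp [ih 0]

-- ===== VERDICT (by name: the statement is the Claim_ definition above) =====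
theorem reduce_bool_row_spec : Claim_equal_reduce_bool_row := by
  intro bool_row _
  unfold Spec_reduce_bool_row reduce_bool_row reduce_bool_row_alt
  have hA : reduceLoopA bool_row 0 bool_row = iso false bool_row := by
    simpa using reduceLoopA_eq_iso [] bool_row
  have hB : reduceLoopB bool_row 0 = iso false bool_row := by
    simpa using reduceLoopB_eq_iso bool_row 0
  exact hA.trans hB.symm
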